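-- pv_equiv track=rewrite | github.com/McslAy3r/Stockker | main.py | find_mentioned_entities
-- ===== SOURCE A (Python) =====
-- def find_mentioned_entities(text, entity_list):
--     mentioned = set()
--     text_upper = text.upper()
--     words = text_upper.split()
--     for entity in entity_list:
--         if entity in words:
--              mentioned.add(entity)
--         elif f"${entity}" in text_upper:
--              mentioned.add(entity)
--     return list(mentioned)
-- ===== SOURCE B (Python) =====
-- def find_mentioned_entities(text, entity_list):
--     # Text-driven scan: instead of searching the text once per entity, walk the
--     # text once, looking up candidate substrings in a hash set of entities.
--     tu = text.upper()
--     entity_set = set(entity_list)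
--     max_len = max((len(e) for e in entity_list), default=0)
--     found = set()
--     for w in tu.split():
--         if w in entity_set:
--             found.add(w)
--     for i, c in enumerate(tu):
--         if c == '$':
--             for L in range(max_len + 1):
--                 cand = tu[i + 1:i + 1 + L]
--                 if cand in entity_set:
--                     found.add(cand)
--     return [e for e in dict.fromkeys(entity_list) if e in found]
-- ===== Notes on version B (the rewrite author's own statement) =====
-- stated objective: faster
-- what changed: B inverts the matching direction: instead of A's per-entity scan of the word list and per-entity full-text substring search, B walks the text once, collecting into a 'found' set every word and every bounded-length slice after a '$' that belongs to a hash set of entities, then filters the deduplicated entity list by membership in 'found'.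
import Mathlib
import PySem

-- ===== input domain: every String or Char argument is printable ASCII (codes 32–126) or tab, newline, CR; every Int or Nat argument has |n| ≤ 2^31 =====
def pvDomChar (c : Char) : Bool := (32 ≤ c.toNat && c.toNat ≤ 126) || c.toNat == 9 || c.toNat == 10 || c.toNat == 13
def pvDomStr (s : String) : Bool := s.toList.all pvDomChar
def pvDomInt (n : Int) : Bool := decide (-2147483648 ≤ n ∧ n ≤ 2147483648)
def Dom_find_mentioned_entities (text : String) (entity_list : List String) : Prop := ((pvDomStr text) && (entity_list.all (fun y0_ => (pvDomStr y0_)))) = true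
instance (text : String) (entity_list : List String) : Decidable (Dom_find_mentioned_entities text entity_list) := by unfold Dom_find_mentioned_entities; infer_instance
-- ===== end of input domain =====

-- B flips the scan: instead of searching the text once per entity, it walks the text once,
-- looking up candidate substrings (words, and bounded-length slices after each '$') in a hash
-- set of entities (objective: alternative, text-driven matching).


-- ===== PORT A =====
-- The Python returns list(mentioned) of a set built during the loop; the port returns the set's
-- distinct elements (PySem.Set); Python's hash iteration order is not modelled (outputs compared as sets).
def find_mentioned_entities (text : String) (entity_list : List String) : List String :=
  let text_upper := PySem.Str.upper text
  let words := PySem.Str.split₀ text_upper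
  entity_list.foldl (fun mentioned entity =>
    if words.contains entity then
      PySem.Set.add mentioned entity
    else if PySem.Str.isIn (String.ofList ('$' :: entity.toList)) text_upper then
      -- f"${entity}" ported as the literal character '$' consed onto entity
      PySem.Set.add mentioned entity
    else mentioned) (PySem.Set.empty)

-- ===== PORT B =====
def find_mentioned_entities_alt (text : String) (entity_list : List String) : List String :=
  let tu := PySem.Str.upper text
  let entity_set : PySem.Set String := PySem.Set.ofList entity_list
  -- max((len(e) for e in entity_list), default=0), as a fold (all lengths are ≥ 0)
  let max_len : Int := entity_list.foldl (fun m e => max m (e.length : Int)) 0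
  let found1 : PySem.Set String := (PySem.Str.split₀ tu).foldl
    (fun f w => if PySem.Set.contains entity_set w then PySem.Set.add f w else f)
    PySem.Set.empty
  let cs := tu.toList
  let found : PySem.Set String := (PySem.List.enumerate cs 0).foldl (fun f ic =>
    if ic.2 == '$' then
      -- Python's local 'cand' is inlined
      (PySem.List.pyRange 0 (max_len + 1) 1).foldl (fun f L =>
        if PySem.Set.contains entity_set (String.ofList (PySem.List.slice cs (some (ic.1 + 1)) (some (ic.1 + 1 + L)))) then
          PySem.Set.add f (String.ofList (PySem.List.slice cs (some (ic.1 + 1)) (some (ic.1 + 1 + L))))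
        else f) f
    else f) found1
  (PySem.List.dedup entity_list).filter (fun e => PySem.Set.contains found e)

-- ===== PRECONDITION & SPEC =====
def Spec_find_mentioned_entities (text : String) (entity_list : List String) (out : List String) : Prop := out = find_mentioned_entities_alt text entity_list
instance (text : String) (entity_list : List String) (out : List String) : Decidable (Spec_find_mentioned_entities text entity_list out) := by unfold Spec_find_mentioned_entities; infer_instance

-- ===== CLAIM (what is proved, stated in full; the proofs are below) =====
def Claim_equal_find_mentioned_entities : Prop := ∀ (text : String) (entity_list : List String), Dom_find_mentioned_entities text entity_list → Spec_find_mentioned_entities text entity_list (find_mentioned_entities text entity_list)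

-- ===== LEMMAS AND PROOFS =====

-- membership in a foldl whose step only (conditionally) adds elements
theorem pv_mem_foldl_iff {α β : Type} [BEq β] [LawfulBEq β]
    (step : PySem.Set β → α → PySem.Set β) (Q : α → β → Prop)
    (h : ∀ s a x, x ∈ step s a ↔ x ∈ s ∨ Q a x) :
    ∀ (l : List α) (s : PySem.Set β) (x : β),
      x ∈ l.foldl step s ↔ x ∈ s ∨ ∃ a ∈ l, Q a x := by
  intro l
  induction l with
  | nil => intro s x; simp
  | cons a l ih =>
    intro s x
    simp only [List.foldl_cons, ih, h, List.mem_cons]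
    constructor
    · rintro ((hs | hq) | ⟨b, hb, hQ⟩)
      · exact Or.inl hs
      · exact Or.inr ⟨a, Or.inl rfl, hq⟩
      · exact Or.inr ⟨b, Or.inr hb, hQ⟩
    · rintro (hs | ⟨b, (rfl | hb), hQ⟩)
      · exact Or.inl (Or.inl hs)
      · exact Or.inl (Or.inr hQ)
      · exact Or.inr ⟨b, hb, hQ⟩

theorem pv_mem_addIf {β : Type} [BEq β] [LawfulBEq β] (f : PySem.Set β) (c : Bool) (y x : β) :
    (x ∈ if c = true then PySem.Set.add f y else f) ↔ x ∈ f ∨ (c = true ∧ x = y) := by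
  cases c <;> simp [PySem.Set.mem_add]

theorem pv_le_foldl_maxlen_init : ∀ (l : List String) (a : Int),
    a ≤ l.foldl (fun m e => max m (e.length : Int)) a := by
  intro l
  induction l with
  | nil => intro a; simp
  | cons b l ih =>
    intro a
    exact le_trans (le_max_left _ _) (ih (max a (b.length : Int)))

theorem pv_len_le_maxlen : ∀ (l : List String) (a : Int) (e : String), e ∈ l →
    (e.length : Int) ≤ l.foldl (fun m e => max m (e.length : Int)) a := by
  intro l
  induction l with
  | nil => intro a e h; cases h
  | cons b l ih =>
    intro a e h
    rcases List.mem_cons.mp h with rfl | h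
    · exact le_trans (le_max_right _ _) (pv_le_foldl_maxlen_init l _)
    · exact ih _ e h

theorem pv_contains_iff {β : Type} [BEq β] [LawfulBEq β] (s : PySem.Set β) (x : β) :
    PySem.Set.contains s x = true ↔ x ∈ s := by
  show List.contains s x = true ↔ x ∈ s
  exact List.contains_iff_mem

-- filter commutes with building a PySem.Set (first occurrences)
theorem pv_filter_foldl_add {β : Type} [BEq β] [LawfulBEq β] (q : β → Bool) :
    ∀ (l : List β) (s : PySem.Set β),
      (l.foldl PySem.Set.add s).filter q = (l.filter q).foldl PySem.Set.add (s.filter q) := by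
  intro l
  induction l with
  | nil => intro s; simp
  | cons a l ih =>
    intro s
    cases hqa : q a with
    | true =>
      have hadd : List.filter q (PySem.Set.add s a) = PySem.Set.add (List.filter q s) a := by
        unfold PySem.Set.add
        by_cases hm : a ∈ s
        · have hm' : a ∈ List.filter q s := List.mem_filter.mpr ⟨hm, hqa⟩
          rw [if_pos, if_pos]
          · exact (pv_contains_iff _ _).mpr hm'
          · exact (pv_contains_iff _ _).mpr hm
        · have hm' : a ∉ List.filter q s := fun h => hm (List.mem_filter.mp h).1
          rw [if_neg, if_neg, List.filter_append]
          · simp [hqa]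
          · intro h; exact hm' ((pv_contains_iff _ _).mp h)
          · intro h; exact hm ((pv_contains_iff _ _).mp h)
      simp only [List.foldl_cons, List.filter_cons, hqa, ite_true]
      rw [ih, hadd]
    | false =>
      have hadd : List.filter q (PySem.Set.add s a) = List.filter q s := by
        unfold PySem.Set.add
        split
        · rfl
        · rw [List.filter_append]; simp [hqa]
      simp only [List.foldl_cons, List.filter_cons, hqa]
      rw [ih, hadd]
      simp

theorem pv_filter_ofList {β : Type} [BEq β] [LawfulBEq β] (q : β → Bool) (l : List β) :
    PySem.Set.ofList (l.filter q) = (PySem.Set.ofList l).filter q := by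
  rw [PySem.Set.ofList_eq_foldl, PySem.Set.ofList_eq_foldl, pv_filter_foldl_add]
  rfl

-- the '$'-substring test equals "some '$' position is followed by a slice equal to e"
theorem pv_dollar_iff (cs : List Char) (es : PySem.Set String) (ml : Int) (e : String)
    (hlen : (e.length : Int) ≤ ml) (hes : PySem.Set.contains es e = true) :
    (PySem.Chars.isIn ('$' :: e.toList) cs = true) ↔
      ∃ ic ∈ PySem.List.enumerate cs 0, ic.2 = '$' ∧
        ∃ L ∈ PySem.List.pyRange 0 (ml + 1) 1,
          PySem.Set.contains es (String.ofList (PySem.List.slice cs (some (ic.1 + 1)) (some (ic.1 + 1 + L)))) = true ∧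
          e = String.ofList (PySem.List.slice cs (some (ic.1 + 1)) (some (ic.1 + 1 + L))) := by
  rw [← PySem.Chars.exists_prefix_drop_iff_isIn]
  constructor
  · rintro ⟨j, hp⟩
    have hj : j < cs.length := by
      have h1 := hp.length_le
      simp [List.length_drop] at h1
      omega
    rw [List.drop_eq_getElem_cons hj, List.cons_prefix_cons] at hp
    refine ⟨((j : Int), '$'), ?_, rfl, (e.length : Int), ?_, ?_⟩
    · rw [PySem.List.mem_enumerate_iff]
      refine ⟨j, hj, ?_⟩
      simp only [zero_add]
      rw [← hp.1]
    · rw [PySem.List.mem_pyRange_one]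
      constructor
      · exact Int.natCast_nonneg _
      · omega
    · have hslice : PySem.List.slice cs (some ((j : Int) + 1)) (some ((j : Int) + 1 + (e.length : Int)))
          = (cs.drop (j + 1)).take e.length := by
        have := PySem.List.slice_natCast_add cs (j + 1) e.length
        push_cast at this ⊢
        convert this using 3
      have htake : (cs.drop (j + 1)).take e.length = e.toList := by
        have := hp.2
        have h2 : e.toList = (cs.drop (j + 1)).take e.toList.length := List.prefix_iff_eq_take.mp this
        simpa using h2.symm
      rw [hslice, htake]
      have hof : String.ofList e.toList = e := by
        apply String.toList_injective
        rw [String.toList_ofList]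
      rw [hof]
      exact ⟨hes, rfl⟩
  · rintro ⟨ic, hic, hdollar, L, hL, _, hcand⟩
    rw [PySem.List.mem_enumerate_iff] at hic
    obtain ⟨k, hk, rfl⟩ := hic
    simp only [zero_add] at *
    rw [PySem.List.mem_pyRange_one] at hL
    have hslice : PySem.List.slice cs (some ((k : Int) + 1)) (some ((k : Int) + 1 + L))
        = (cs.drop (k + 1)).take (((k : Int) + 1 + L).toNat - (k + 1)) := by
      rw [PySem.List.slice_toNat cs (by omega) (by omega)]
      rfl
    refine ⟨k, ?_⟩
    rw [List.drop_eq_getElem_cons hk, List.cons_prefix_cons]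
    constructor
    · exact hdollar.symm
    · have : e.toList = (cs.drop (k + 1)).take (((k : Int) + 1 + L).toNat - (k + 1)) := by
        rw [hcand, hslice]
        simp
      rw [this]
      exact List.take_prefix _ _

-- membership in B's text-driven 'found' set
theorem pv_mem_found (cs : List Char) (es : PySem.Set String) (ml : Int)
    (found1 : PySem.Set String) (x : String) :
    (x ∈ (PySem.List.enumerate cs 0).foldl (fun f ic =>
        if ic.2 == '$' then
          (PySem.List.pyRange 0 (ml + 1) 1).foldl (fun f L =>
            if PySem.Set.contains es (String.ofList (PySem.List.slice cs (some (ic.1 + 1)) (some (ic.1 + 1 + L)))) then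
              PySem.Set.add f (String.ofList (PySem.List.slice cs (some (ic.1 + 1)) (some (ic.1 + 1 + L))))
            else f) f
        else f) found1) ↔
      x ∈ found1 ∨ ∃ ic ∈ PySem.List.enumerate cs 0, ic.2 = '$' ∧
        ∃ L ∈ PySem.List.pyRange 0 (ml + 1) 1,
          PySem.Set.contains es (String.ofList (PySem.List.slice cs (some (ic.1 + 1)) (some (ic.1 + 1 + L)))) = true ∧
          x = String.ofList (PySem.List.slice cs (some (ic.1 + 1)) (some (ic.1 + 1 + L))) := by
  refine pv_mem_foldl_iff _
    (fun ic x => ic.2 = '$' ∧ ∃ L ∈ PySem.List.pyRange 0 (ml + 1) 1,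
      PySem.Set.contains es (String.ofList (PySem.List.slice cs (some (ic.1 + 1)) (some (ic.1 + 1 + L)))) = true ∧
      x = String.ofList (PySem.List.slice cs (some (ic.1 + 1)) (some (ic.1 + 1 + L))))
    ?_ (PySem.List.enumerate cs 0) found1 x
  intro s ic y
  by_cases hd : ic.2 = '$'
  · have hb : (ic.2 == '$') = true := by simpa using hd
    rw [if_pos hb]
    rw [pv_mem_foldl_iff _
      (fun L y =>
        PySem.Set.contains es (String.ofList (PySem.List.slice cs (some (ic.1 + 1)) (some (ic.1 + 1 + L)))) = true ∧
        y = String.ofList (PySem.List.slice cs (some (ic.1 + 1)) (some (ic.1 + 1 + L))))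
      (fun s' L z => pv_mem_addIf s' _ _ z) (PySem.List.pyRange 0 (ml + 1) 1) s y]
    simp only [hd, true_and]
  · have hb : (ic.2 == '$') = false := by simpa using hd
    rw [if_neg (by simp [hb])]
    simp [hd]

-- membership in B's word-driven 'found1' set
theorem pv_mem_found1 (words : List String) (es : PySem.Set String) (x : String) :
    (x ∈ words.foldl (fun f w => if PySem.Set.contains es w then PySem.Set.add f w else f)
        PySem.Set.empty) ↔
      x ∈ words ∧ PySem.Set.contains es x = true := by
  rw [pv_mem_foldl_iff _ (fun w x => PySem.Set.contains es w = true ∧ x = w)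
    (fun s a x => pv_mem_addIf s _ a x) words PySem.Set.empty x]
  constructor
  · rintro (h | ⟨w, hw, hc, rfl⟩)
    · cases h
    · exact ⟨hw, hc⟩
  · rintro ⟨hw, hc⟩
    exact Or.inr ⟨x, hw, hc, rfl⟩

-- per-entity: A's test equals membership in B's found set, for entities of the list
theorem pv_cond_eq (tu : String) (entity_list : List String) (e : String)
    (he : e ∈ entity_list) :
    ((PySem.Str.split₀ tu).contains e
      || PySem.Str.isIn (String.ofList ('$' :: e.toList)) tu) =
    PySem.Set.contains
      ((PySem.List.enumerate tu.toList 0).foldl (fun f ic =>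
        if ic.2 == '$' then
          (PySem.List.pyRange 0 ((entity_list.foldl (fun m e => max m (e.length : Int)) 0) + 1) 1).foldl (fun f L =>
            if PySem.Set.contains (PySem.Set.ofList entity_list) (String.ofList (PySem.List.slice tu.toList (some (ic.1 + 1)) (some (ic.1 + 1 + L)))) then
              PySem.Set.add f (String.ofList (PySem.List.slice tu.toList (some (ic.1 + 1)) (some (ic.1 + 1 + L))))
            else f) f
        else f)
        ((PySem.Str.split₀ tu).foldl
          (fun f w => if PySem.Set.contains (PySem.Set.ofList entity_list) w then PySem.Set.add f w else f)
          PySem.Set.empty)) e := by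
  have hes : PySem.Set.contains (PySem.Set.ofList entity_list) e = true :=
    (pv_contains_iff _ _).mpr ((PySem.Set.mem_ofList entity_list e).mpr he)
  have hlen : (e.length : Int) ≤ entity_list.foldl (fun m e => max m (e.length : Int)) 0 :=
    pv_len_le_maxlen entity_list 0 e he
  rw [Bool.eq_iff_iff, Bool.or_eq_true, List.contains_iff_mem,
    pv_contains_iff, pv_mem_found, pv_mem_found1]
  have hisin : PySem.Str.isIn (String.ofList ('$' :: e.toList)) tu = true ↔
      PySem.Chars.isIn ('$' :: e.toList) tu.toList = true := by
    rw [PySem.Str.isIn_eq, String.toList_ofList]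
  rw [hisin, pv_dollar_iff tu.toList (PySem.Set.ofList entity_list) _ e hlen hes]
  constructor
  · rintro (hw | hd)
    · exact Or.inl ⟨hw, hes⟩
    · exact Or.inr hd
  · rintro (⟨hw, _⟩ | hd)
    · exact Or.inl hw
    · exact Or.inr hd

theorem pv_main_eq (text : String) (entity_list : List String) :
    find_mentioned_entities text entity_list = find_mentioned_entities_alt text entity_list := by
  unfold find_mentioned_entities find_mentioned_entities_alt
  simp only
  have hfun : (fun (mentioned : PySem.Set String) (entity : String) =>
      if (PySem.Str.split₀ (PySem.Str.upper text)).contains entity then PySem.Set.add mentioned entity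
      else if PySem.Str.isIn (String.ofList ('$' :: entity.toList)) (PySem.Str.upper text) then
        PySem.Set.add mentioned entity
      else mentioned)
    = (fun (mentioned : PySem.Set String) (entity : String) =>
        if ((PySem.Str.split₀ (PySem.Str.upper text)).contains entity
            || PySem.Str.isIn (String.ofList ('$' :: entity.toList)) (PySem.Str.upper text)) = true then
          PySem.Set.add mentioned entity
        else mentioned) := by
    funext s e
    by_cases h1 : e ∈ PySem.Str.split₀ (PySem.Str.upper text) <;>
      by_cases h2 : PySem.Chars.isIn ('$' :: e.toList) (PySem.Chars.upper text.toList) = true <;>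
      simp [h1, h2]
  rw [hfun, ← List.foldl_filter]
  have hempty : (PySem.Set.empty : PySem.Set String) = ([] : List String) := rfl
  rw [hempty, ← PySem.Set.ofList_eq_foldl, PySem.List.dedup_eq_ofList]
  rw [pv_filter_ofList]
  refine List.filter_congr ?_
  intro e he
  exact pv_cond_eq (PySem.Str.upper text) entity_list e ((PySem.Set.mem_ofList _ _).mp he)

-- ===== VERDICT (by name: the statement is the Claim_ definition above) =====
theorem find_mentioned_entities_spec : Claim_equal_find_mentioned_entities := by
  intro text entity_list _
  unfold Spec_find_mentioned_entities
  exact pv_main_eq text entity_list
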